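-- pv_equiv track=rewrite | github.com/krzyssikora/advent_of_code | aoc_2021/25_1_cucumbers.py | one_direction
-- ===== SOURCE A (Python) =====
-- def transpose(strings):
--     many = len(strings[0])
--     new_strings = ["" for _ in range(many)]
--     for line in strings:
--         for i in range(many):
--             if line[i] == ".":
--                 char = "."
--             elif line[i] == "v":
--                 char = ">"
--             else:
--                 char = "v"
--             new_strings[i] += char
--     return new_strings
--
-- def one_direction(strings, vertical=False):
--     if vertical:
--         strings = transpose(strings)
--     found = False
--     new_strings = list()
--     for line in strings:
--         swap_ends = False
--         if line[0] == "." and line[-1:] == ">":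
--             swap_ends = True
--             found = True
--         pos = -1
--         while True:
--             pos = line.find(">.", pos + 1)
--             if pos >= 0:
--                 found = True
--                 line = line[:pos] + ".>" + line[pos + 2:]
--                 pos += 1
--             if pos == -1:
--                 break
--         if swap_ends:
--             line = ">" + line[1:-1] + "."
--         new_strings.append(line)
--     if vertical:
--         new_strings = transpose(new_strings)
--     return new_strings, found
-- ===== SOURCE B (Python) =====
-- def _enc(c):
--     # the module's direction-swapping encoding: '.' free, 'v' becomes the mover '>',
--     # anything else becomes the blocker 'v'
--     if c == ".":
--         return "."
--     if c == "v":
--         return ">"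
--     return "v"
--
-- def _cell(prev, cur, nxt):
--     # simultaneous-step rule for one cell of a cyclic row of movers '>'
--     if cur == ">" and nxt == ".":
--         return "."
--     if cur == "." and prev == ">":
--         return ">"
--     return cur
--
-- def one_direction(strings, vertical=False):
--     out, found = [], False
--     if vertical:
--         n, w = len(strings), len(strings[0])
--         for r in range(n):
--             row = []
--             for c in range(w):
--                 up = _enc(strings[(r - 1) % n][c])
--                 cur = _enc(strings[r][c])
--                 down = _enc(strings[(r + 1) % n][c])
--                 moved = _cell(up, cur, down)
--                 found = found or moved != cur
--                 row.append(_enc(moved))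
--             out.append("".join(row))
--     else:
--         for row in strings:
--             n = len(row)
--             new = "".join(_cell(row[(i - 1) % n], row[i], row[(i + 1) % n])
--                           for i in range(n))
--             found = found or new != row
--             out.append(new)
--     return out, found
-- ===== Notes on version B (the rewrite author's own statement) =====
-- stated objective: alternative
-- what changed: B computes each output cell by a local closed-form stencil rule from its cyclic neighbours in the ORIGINAL grid (cellular-automaton style), with the vertical case read column-wise through the module's direction-swapping encoding, replacing A's repeated str.find('>.')-and-reslice rewriting loop and its two full transpose passes; found becomes 'some cell changed'.
import Mathlib
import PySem

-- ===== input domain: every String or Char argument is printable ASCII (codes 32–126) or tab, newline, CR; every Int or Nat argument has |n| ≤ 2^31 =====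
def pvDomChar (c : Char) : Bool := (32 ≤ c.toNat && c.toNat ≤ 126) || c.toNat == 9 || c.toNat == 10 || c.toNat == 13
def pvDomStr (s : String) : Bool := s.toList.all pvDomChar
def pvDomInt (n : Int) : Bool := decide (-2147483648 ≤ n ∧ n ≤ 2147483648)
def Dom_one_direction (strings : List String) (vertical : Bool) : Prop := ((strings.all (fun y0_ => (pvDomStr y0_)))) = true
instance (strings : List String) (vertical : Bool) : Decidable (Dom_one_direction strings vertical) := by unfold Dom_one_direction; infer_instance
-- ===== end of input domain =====

-- B computes every output cell by one local stencil rule from its cyclic neighbours in the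
-- ORIGINAL grid (column-wise through the module's encoding in the vertical case), instead of
-- A's repeated find-and-reslice rewriting plus two transposes; return-value equivalence.

-- ===== PORT A =====
-- char mapping inside A's transpose ('.'→'.', 'v'→'>', else 'v')
def tCharA (c : Char) : Char := if c = '.' then '.' else if c = 'v' then '>' else 'v'

-- A's transpose: many = len(strings[0]); new_strings[i] += mapped(line[i]) for each line
def transposeA (rows : List (List Char)) : List (List Char) :=
  let many := (rows.headD []).length
  rows.foldl
    (fun acc line => (List.range many).map (fun i => acc.getD i [] ++ [tCharA (line.getD i ' ')]))
    ((List.range many).map (fun _ => ([] : List Char)))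

-- A's inner while loop: pos = line.find(">.", pos+1); swap; repeat.  Fuel only makes it total;
-- fuel = length+1 always suffices (proved in the loop lemma below).
def lineLoopA : Nat → List Char → Int → List Char × Bool
  | 0, line, _ => (line, false)
  | fuel + 1, line, pos =>
    let p := PySem.Chars.findFrom line ['>', '.'] (pos + 1) none
    if 0 ≤ p then
      let r := lineLoopA fuel
        (PySem.List.slice line none (some p) ++ '.' :: '>' :: PySem.List.slice line (some (p + 2)) none)
        (p + 1)
      (r.1, true)
    else (line, false)

-- A's per-line body: swap_ends test, the while loop, then line = ">" + line[1:-1] + "."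
def procA (line : List Char) : List Char × Bool :=
  let swapEnds := line.headD ' ' = '.' ∧ PySem.List.slice line (some (-1)) none = ['>']
  let r := lineLoopA (line.length + 1) line (-1)
  let line2 := if swapEnds then '>' :: (PySem.List.slice r.1 (some 1) (some (-1)) ++ ['.']) else r.1
  (line2, decide swapEnds || r.2)

def one_direction (strings : List String) (vertical : Bool) : List String × Bool :=
  let rows0 := strings.map String.toList
  let rows := if vertical then transposeA rows0 else rows0
  let res := rows.foldl
    (fun (acc : List (List Char) × Bool) line =>
      let pr := procA line
      (acc.1 ++ [pr.1], acc.2 || pr.2))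
    ([], false)
  let out := if vertical then transposeA res.1 else res.1
  (out.map (fun l => String.ofList l), res.2)

-- ===== PORT B =====
-- Source B's _enc: the module's direction-swapping encoding
def encB (c : Char) : Char := if c = '.' then '.' else if c = 'v' then '>' else 'v'

-- Source B's _cell: the simultaneous-step rule for one cell of a cyclic row of movers '>'
def cellB (p c nx : Char) : Char :=
  if c = '>' ∧ nx = '.' then '.' else if c = '.' ∧ p = '>' then '>' else c

-- Source B's horizontal row: join of _cell(row[(i-1)%n], row[i], row[(i+1)%n]) over range(n)
def stencilRow (l : List Char) : List Char :=
  (List.range l.length).map (fun (i : Nat) =>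
    cellB (l.getD (PySem.Int.mod ((i : Int) - 1) (l.length : Int)).toNat ' ')
          (l.getD i ' ')
          (l.getD (PySem.Int.mod ((i : Int) + 1) (l.length : Int)).toNat ' '))

def one_direction_alt (strings : List String) (vertical : Bool) : List String × Bool :=
  let g := strings.map String.toList
  let res :=
    if vertical then
      let n := g.length
      let w := (g.headD []).length
      (List.range n).foldl
        (fun (acc : List (List Char) × Bool) (r : Nat) =>
          let rr := (List.range w).foldl
            (fun (acc2 : List Char × Bool) (c : Nat) =>
              let up := encB ((g.getD (PySem.Int.mod ((r : Int) - 1) (n : Int)).toNat []).getD c ' ')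
              let cur := encB ((g.getD r []).getD c ' ')
              let down := encB ((g.getD (PySem.Int.mod ((r : Int) + 1) (n : Int)).toNat []).getD c ' ')
              let moved := cellB up cur down
              (acc2.1 ++ [encB moved], acc2.2 || decide (moved ≠ cur)))
            ([], acc.2)
          (acc.1 ++ [rr.1], rr.2))
        ([], false)
    else
      g.foldl
        (fun (acc : List (List Char) × Bool) row =>
          let nw := stencilRow row
          (acc.1 ++ [nw], acc.2 || decide (nw ≠ row)))
        ([], false)
  (res.1.map (fun l => String.ofList l), res.2)

-- ===== PRECONDITION & SPEC =====
-- Pre_ is exactly where the Python A returns: non-vertical it indexes line[0] (IndexError on a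
-- zero-length row); vertical its transpose needs a non-void grid of positive width whose first row
-- is no longer than any other row (otherwise some strings[0]/line[i] access raises IndexError).
def Pre_one_direction (strings : List String) (vertical : Bool) : Prop :=
  if vertical then
    strings ≠ [] ∧ 0 < (strings.headD "").toList.length ∧
      ∀ s ∈ strings, (strings.headD "").toList.length ≤ s.toList.length
  else ∀ s ∈ strings, s.toList ≠ []
instance (strings : List String) (vertical : Bool) : Decidable (Pre_one_direction strings vertical) := by
  unfold Pre_one_direction; infer_instance

def pvWitness_one_direction : List String × Bool := (["v.>", ".>v"], true)

def Spec_one_direction (strings : List String) (vertical : Bool) (out : List String × Bool) : Prop := out = one_direction_alt strings vertical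
instance (strings : List String) (vertical : Bool) (out : List String × Bool) : Decidable (Spec_one_direction strings vertical out) := by unfold Spec_one_direction; infer_instance

-- ===== CLAIM (what is proved, stated in full; the proofs are below) =====
def Claim_equal_one_direction : Prop := ∀ (strings : List String) (vertical : Bool), Dom_one_direction strings vertical → Pre_one_direction strings vertical → Spec_one_direction strings vertical (one_direction strings vertical)

-- ===== LEMMAS AND PROOFS =====

-- ['>','.'] is a prefix of l.drop i  ⟺  the cucumber pair sits at position i
def PairAt (l : List Char) (i : Nat) : Prop := ['>', '.'] <+: l.drop i

-- proof-side characterization of A's one simultaneous pass (the find-loop computes it)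
def scanB : List Char → List Char × Bool
  | a :: b :: r =>
    if a = '>' ∧ b = '.' then
      let q := scanB r
      ('.' :: '>' :: q.1, true)
    else
      let q := scanB (b :: r)
      (a :: q.1, q.2)
  | l => (l, false)
  termination_by l => l.length

theorem scanB_length (l : List Char) : (scanB l).1.length = l.length := by
  fun_induction scanB l with
  | case1 a b r h q ih => simpa using ih
  | case2 a b r h q ih => simpa using ih
  | case3 l h => simp

theorem scanB_no_pair (l : List Char) (h : ∀ i, ¬ PairAt l i) : scanB l = (l, false) := by
  fun_induction scanB l with
  | case1 a b r hp q ih =>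
    exact absurd (show PairAt (a :: b :: r) 0 by simp [PairAt, hp.1, hp.2]) (h 0)
  | case2 a b r hp q ih =>
    have : scanB (b :: r) = (b :: r, false) := ih (fun i => by
      have := h (i + 1); simpa [PairAt] using this)
    simp [q, this]
  | case3 l hl => rfl

theorem scanB_first_pair (k : Nat) (l : List Char) (hk : PairAt l k)
    (hmin : ∀ i < k, ¬ PairAt l i) :
    scanB l = (l.take k ++ '.' :: '>' :: (scanB (l.drop (k + 2))).1, true) := by
  induction k generalizing l with
  | zero =>
    obtain ⟨t, rfl⟩ := hk
    simp [scanB]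
  | succ k ih =>
    have hlen : k + 3 ≤ l.length := by
      have h1 := hk.length_le
      simp at h1
      omega
    rcases l with _ | ⟨a, l⟩
    · simp at hlen
    rcases l with _ | ⟨b, r⟩
    · simp at hlen
    have hc : ¬ (a = '>' ∧ b = '.') := by
      intro hab
      exact hmin 0 (by omega) (by simp [PairAt, hab.1, hab.2])
    have hrec := ih (b :: r) (by simpa [PairAt] using hk)
      (fun i hi => by
        have := hmin (i + 1) (by omega)
        simpa [PairAt] using this)
    rw [show scanB (a :: b :: r) = (a :: (scanB (b :: r)).1, (scanB (b :: r)).2) by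
      simp [scanB, hc]]
    simp [hrec]

theorem lineLoopA_eq (fuel n : Nat) (l : List Char) (hn : n ≤ l.length)
    (hfuel : l.length - n < fuel) :
    lineLoopA fuel l ((n : Int) - 1) = (l.take n ++ (scanB (l.drop n)).1, (scanB (l.drop n)).2) := by
  induction fuel generalizing n l with
  | zero => omega
  | succ fuel ih =>
    have hstart : (n : Int) - 1 + 1 = (n : Int) := by ring
    rw [lineLoopA]
    simp only [hstart]
    rw [PySem.Chars.findFrom_natCast l ['>', '.'] n hn]
    set f := PySem.Chars.find (l.drop n) ['>', '.'] with hf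
    by_cases hneg : f = -1
    · have hnp : ∀ i, ¬ PairAt (l.drop n) i := by
        intro i hp
        exact ((PySem.Chars.find_eq_neg_one_iff _ _).mp hneg)
          (hp.isInfix.trans (List.drop_suffix i (l.drop n)).isInfix)
      rw [scanB_no_pair _ hnp]
      simp [hneg]
    · have hge : 0 ≤ f := by
        have := PySem.Chars.neg_one_le_find (l.drop n) ['>', '.']
        omega
      have hspec := PySem.Chars.find_spec (s := l.drop n) (sub := ['>', '.']) hge
      set k := f.toNat with hk
      have hfk : f = (k : Int) := by omega
      have hk2 : n + (k + 2) ≤ l.length := by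
        have h1 := hspec.1.length_le
        simp at h1
        omega
      have hscan := scanB_first_pair k (l.drop n) hspec.1 (fun i hi => hspec.2 i hi)
      rw [if_neg hneg, if_pos (by omega)]
      rw [PySem.List.slice_to l (by omega : (0:Int) ≤ (n:Int) + f),
          PySem.List.slice_from l (by omega : (0:Int) ≤ (n:Int) + f + 2)]
      have htn : ((n : Int) + f).toNat = n + k := by omega
      have htn2 : ((n : Int) + f + 2).toNat = n + (k + 2) := by omega
      rw [htn, htn2]
      set l' := l.take (n + k) ++ '.' :: '>' :: l.drop (n + (k + 2)) with hl'
      have hlen' : l'.length = l.length := by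
        simp [hl']
        omega
      have harg : (n : Int) + f + 1 = ((n + (k + 2) : Nat) : Int) - 1 := by
        push_cast
        omega
      rw [harg, ih (n + (k + 2)) l' (by omega) (by omega)]
      have hlt : (l.take (n + k)).length = n + k := by
        simp
        omega
      have hdrop' : l'.drop (n + (k + 2)) = l.drop (n + (k + 2)) := by
        rw [hl', show n + (k + 2) = (l.take (n + k)).length + 2 by omega,
            ← hlt, List.drop_length_add_append]
        simp
      have htake' : l'.take (n + (k + 2)) = l.take (n + k) ++ ['.', '>'] := by
        rw [hl', show n + (k + 2) = (l.take (n + k)).length + 2 by omega,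
            List.take_append]
        simp [hlt]
      rw [hdrop', htake', hscan]
      simp only [List.drop_drop]
      have hta : l.take n ++ (l.drop n).take k = l.take (n + k) := by
        rw [List.take_add]
      rw [Prod.mk.injEq]
      exact ⟨by rw [← hta]; simp, rfl⟩

theorem slice_one_neg_one (out : List Char) (h : 2 ≤ out.length) :
    PySem.List.slice out (some 1) (some (-1)) = out.tail.dropLast := by
  simp [PySem.List.slice]
  rw [Nat.min_eq_left (by omega), List.dropLast_eq_take, List.length_tail]
  rw [List.drop_one]

theorem scanB_false_eq (l : List Char) (h : (scanB l).2 = false) : (scanB l).1 = l := by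
  fun_induction scanB l with
  | case1 a b r hp q ih => simp at h
  | case2 a b r hp q ih =>
    simp only [q] at h ⊢
    simp [ih h]
  | case3 l hl => rfl

theorem scanB_true_ne (l : List Char) (h : (scanB l).2 = true) : (scanB l).1 ≠ l := by
  fun_induction scanB l with
  | case1 a b r hp q ih =>
    simp only [q]
    intro he
    rw [hp.1] at he
    simp at he
  | case2 a b r hp q ih =>
    simp only [q] at h ⊢
    intro he
    simp only [List.cons.injEq] at he
    exact ih h he.2
  | case3 l hl => simp at h

-- cellB only looks at whether prev is '>' (when cur is '.') and whether next is '.' (when cur is '>')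
theorem cellB_congr (p p' c nx nx' : Char)
    (hp : c = '.' → (p = '>' ↔ p' = '>')) (hn : c = '>' → (nx = '.' ↔ nx' = '.')) :
    cellB p c nx = cellB p' c nx' := by
  by_cases h1 : c = '>' <;> by_cases h2 : c = '.' <;>
    by_cases h3 : nx = '.' <;> by_cases h4 : nx' = '.' <;>
      by_cases h5 : p = '>' <;> by_cases h6 : p' = '>' <;>
        simp_all [cellB]

-- Lemma P: A's pass is pointwise the acyclic stencil ('x' = inert sentinel at the borders)
theorem scanB_getD (l : List Char) : ∀ i, i < l.length →
    (scanB l).1.getD i ' ' =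
      cellB (if i = 0 then 'x' else l.getD (i - 1) ' ') (l.getD i ' ')
            (if i + 1 = l.length then 'x' else l.getD (i + 1) ' ') := by
  fun_induction scanB l with
  | case1 a b r hp q ih =>
    intro i hi
    simp only [q]
    match i with
    | 0 => simp [hp.1, hp.2, cellB]
    | 1 =>
      simp only [List.getD_cons_succ, List.getD_cons_zero]
      rw [hp.1, hp.2]
      by_cases h : (1:Nat) + 1 = (a :: b :: r).length <;> simp [h, cellB]
    | (j+2) =>
      have hj : j < r.length := by simpa using hi
      have := ih j hj
      simp only [List.getD_cons_succ]
      rw [this]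
      apply cellB_congr
      · intro hc
        match j with
        | 0 => rw [hp.2]; simp
        | (k+1) => simp
      · intro hc
        have hlen : (j + 2) + 1 = (a :: b :: r).length ↔ j + 1 = r.length := by
          simp only [List.length_cons]; omega
        by_cases h : j + 1 = r.length
        · simp [h]
        · rw [if_neg h, if_neg (fun hh => h (hlen.mp hh))]
  | case2 a b r hp q ih =>
    intro i hi
    simp only [q]
    match i with
    | 0 =>
      simp only [List.getD_cons_zero]
      have hnx : ¬ ((0:Nat) + 1 = (a :: b :: r).length) := by
        simp only [List.length_cons]; omega
      rw [if_neg hnx]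
      simp only [List.getD_cons_succ, List.getD_cons_zero]
      unfold cellB
      rw [if_neg (by intro h; exact hp ⟨h.1, h.2⟩)]
      simp
    | (j+1) =>
      have hj : j < (b :: r).length := by simpa using hi
      have := ih j hj
      simp only [List.getD_cons_succ]
      rw [this]
      apply cellB_congr
      · intro hc
        match j with
        | 0 =>
          simp only [List.getD_cons_zero] at hc ⊢
          constructor
          · intro h; simp at h
          · intro ha
            exact absurd ⟨ha, hc⟩ hp
        | (k+1) => simp
      · intro hc
        have hlen : (j + 1) + 1 = (a :: b :: r).length ↔ j + 1 = (b :: r).length := by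
          simp only [List.length_cons]; omega
        by_cases h : j + 1 = (b :: r).length
        · simp [h]
        · rw [if_neg h, if_neg (fun hh => h (hlen.mp hh))]
          simp
  | case3 l hl =>
    intro i hi
    rcases l with _ | ⟨a, t⟩
    · simp at hi
    rcases t with _ | ⟨b, r⟩
    · have hi0 : i = 0 := by simpa using hi
      subst hi0
      simp [cellB]
    · exact absurd rfl (hl a b r)

-- Python's (i-1) % n and (i+1) % n for 0 <= i < n
theorem modIdx_pred (r n : Nat) (hr : r < n) :
    (PySem.Int.mod ((r : Int) - 1) (n : Int)).toNat = if r = 0 then n - 1 else r - 1 := by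
  rw [PySem.Int.mod_eq_emod_of_pos (show (0:Int) < (n : Int) by omega)]
  split_ifs with h
  · subst h
    simp only [Nat.cast_zero]
    have hx : ((0:Int) - 1) % (n : Int) = ((n : Int) - 1) % (n : Int) := by
      conv_lhs => rw [show (0:Int) - 1 = ((n : Int) - 1) + (n : Int) * (-1) by ring]
      rw [Int.add_mul_emod_self_left]
    rw [hx, Int.emod_eq_of_lt (by omega) (by omega)]
    omega
  · rw [Int.emod_eq_of_lt (by omega) (by omega)]
    omega

theorem modIdx_succ (r n : Nat) (hr : r < n) :
    (PySem.Int.mod ((r : Int) + 1) (n : Int)).toNat = if r + 1 = n then 0 else r + 1 := by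
  rw [PySem.Int.mod_eq_emod_of_pos (show (0:Int) < (n : Int) by omega)]
  split_ifs with h
  · rw [show (r : Int) + 1 = (n : Int) by omega, Int.emod_self]
    omega
  · rw [Int.emod_eq_of_lt (by omega) (by omega)]
    omega

theorem stencilRow_length (l : List Char) : (stencilRow l).length = l.length := by
  simp [stencilRow]

-- the cyclic indices of stencilRow, made explicit (valid for l.length > 0)
theorem stencilRow_getD (l : List Char) (i : Nat) (hi : i < l.length) :
    (stencilRow l).getD i ' ' =
      cellB (l.getD (if i = 0 then l.length - 1 else i - 1) ' ') (l.getD i ' ')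
            (l.getD (if i + 1 = l.length then 0 else i + 1) ' ') := by
  unfold stencilRow
  rw [List.getD_eq_getElem _ _ (by simpa using hi), List.getElem_map, List.getElem_range,
      modIdx_pred i l.length hi, modIdx_succ i l.length hi]

-- the wrap condition of a row
def WrapC (l : List Char) : Prop := l.getD 0 ' ' = '.' ∧ l.getD (l.length - 1) ' ' = '>'

theorem head_getD (l : List Char) (h : l ≠ []) : l.headD ' ' = l.getD 0 ' ' := by
  rcases l with _ | ⟨a, t⟩
  · simp at h
  · simp

-- no wrap: B's cyclic stencil coincides with A's pass
theorem stencil_eq_scan (l : List Char) (hne : l ≠ []) (hnw : ¬ WrapC l) :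
    stencilRow l = (scanB l).1 := by
  have hn : 0 < l.length := List.length_pos_iff.mpr hne
  apply List.ext_getElem (by rw [stencilRow_length, scanB_length])
  intro i h1 h2
  rw [← List.getD_eq_getElem _ ' ' h1, ← List.getD_eq_getElem _ ' ' h2]
  have hi : i < l.length := by simpa [stencilRow_length] using h1
  rw [stencilRow_getD l i hi, scanB_getD l i hi]
  apply cellB_congr
  · intro hc
    split_ifs with h0
    · subst h0
      constructor
      · intro hlast
        exact absurd ⟨hc, hlast⟩ hnw
      · intro h; simp at h
    · simp
  · intro hc
    split_ifs with h0
    · -- i + 1 = length: the cyclic next is the head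
      constructor
      · intro hh
        have hlast : l.getD (l.length - 1) ' ' = '>' := by
          rw [show l.length - 1 = i by omega]; exact hc
        exact absurd ⟨hh, hlast⟩ hnw
      · intro h; simp at h
    · simp

-- wrap: B's cyclic stencil is A's pass with the two ends swapped
theorem stencil_eq_wrap (l : List Char) (hne : l ≠ []) (hw : WrapC l) :
    stencilRow l = '>' :: (PySem.List.slice (scanB l).1 (some 1) (some (-1)) ++ ['.']) := by
  have hn : 0 < l.length := List.length_pos_iff.mpr hne
  obtain ⟨hh, hl⟩ := hw
  have hn2 : 2 ≤ l.length := by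
    by_contra h
    have h1 : l.length = 1 := by omega
    rw [h1] at hl
    have hl0 : l.getD 0 ' ' = '>' := hl
    rw [hh] at hl0
    exact absurd hl0 (by decide)
  have hsl : 2 ≤ (scanB l).1.length := by rw [scanB_length]; omega
  rw [slice_one_neg_one _ hsl]
  have hlenr : ('>' :: ((scanB l).1.tail.dropLast ++ ['.'])).length = l.length := by
    simp [List.length_tail, scanB_length]
    omega
  apply List.ext_getElem (by rw [stencilRow_length, hlenr])
  intro i h1 h2
  have hi : i < l.length := by simpa [stencilRow_length] using h1
  rw [← List.getD_eq_getElem _ ' ' h1, ← List.getD_eq_getElem _ ' ' h2]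
  rw [stencilRow_getD l i hi]
  by_cases h0 : i = 0
  · subst h0
    have e1 : (if (0:Nat) = 0 then l.length - 1 else 0 - 1) = l.length - 1 := rfl
    rw [e1, if_neg (by omega : ¬ (0 + 1 = l.length)), hh, hl]
    simp [cellB]
  · by_cases hlast : i = l.length - 1
    · subst hlast
      rw [if_neg h0, if_pos (by omega), hl, hh]
      have hrhs : ('>' :: ((scanB l).1.tail.dropLast ++ ['.'])).getD (l.length - 1) ' ' = '.' := by
        rw [List.getD_eq_getElem _ _ (by rw [hlenr]; omega)]
        rw [List.getElem_cons]
        rw [dif_neg (by omega)]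
        rw [List.getElem_append_right
          (by simp only [List.length_dropLast, List.length_tail, scanB_length]; omega)]
        simp
      rw [hrhs]
      simp [cellB]
    · -- middle cell
      rw [if_neg h0, if_neg (by omega)]
      have hmid : ('>' :: ((scanB l).1.tail.dropLast ++ ['.'])).getD i ' ' = (scanB l).1.getD i ' ' := by
        rw [List.getD_eq_getElem _ _ (by rw [hlenr]; omega)]
        rw [List.getElem_cons, dif_neg h0]
        rw [List.getElem_append_left
          (by simp only [List.length_dropLast, List.length_tail, scanB_length]; omega)]
        rw [List.getElem_dropLast, List.getElem_tail]
        rw [List.getD_eq_getElem _ ' ' (by rw [scanB_length]; omega)]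
        congr 1
        omega
      rw [hmid, scanB_getD l i hi, if_neg h0, if_neg (by omega)]

-- A's per-line body computes exactly B's stencil row, with found = "the row changed"
theorem procA_stencil (l : List Char) (hne : l ≠ []) :
    procA l = (stencilRow l, decide (stencilRow l ≠ l)) := by
  have hn : 0 < l.length := List.length_pos_iff.mpr hne
  have hloop : lineLoopA (l.length + 1) l (-1) = scanB l := by
    have h0 := lineLoopA_eq (l.length + 1) 0 l (by omega) (by omega)
    simpa using h0
  have hslice : PySem.List.slice l (some (-1)) none = [l.getLast hne] := by
    rw [PySem.List.slice_from_neg_one, List.drop_length_sub_one hne]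
  have hlastD : l.getD (l.length - 1) ' ' = l.getLast hne := by
    rw [List.getD_eq_getElem _ _ (by omega), List.getLast_eq_getElem]
  have hcond : (l.headD ' ' = '.' ∧ PySem.List.slice l (some (-1)) none = ['>']) ↔ WrapC l := by
    rw [hslice, head_getD l hne, WrapC, hlastD]
    simp
  unfold procA
  simp only [hloop]
  by_cases hw : WrapC l
  · rw [if_pos (hcond.mpr hw)]
    rw [← stencil_eq_wrap l hne hw]
    rw [Prod.mk.injEq]
    refine ⟨rfl, ?_⟩
    have hne2 : stencilRow l ≠ l := by
      intro he
      have h0 : (stencilRow l).getD 0 ' ' = l.getD 0 ' ' := by rw [he]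
      rw [stencil_eq_wrap l hne hw] at h0
      simp only [List.getD_cons_zero] at h0
      rw [hw.1] at h0
      exact absurd h0 (by decide)
    simp only [ne_eq, hne2, not_false_eq_true, decide_true, Bool.or_eq_true]
    exact Or.inl (by simpa using (hcond.mpr hw))
  · rw [if_neg (fun h => hw (hcond.mp h))]
    rw [← stencil_eq_scan l hne hw]
    rw [show scanB l = ((scanB l).1, (scanB l).2) from rfl]
    simp only [Prod.mk.injEq]
    rw [stencil_eq_scan l hne hw]
    refine ⟨by first | rfl | trivial, ?_⟩
    have hdec : decide (l.headD ' ' = '.' ∧ PySem.List.slice l (some (-1)) none = ['>']) = false := by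
      simpa using fun h => hw (hcond.mp h)
    rw [hdec, Bool.false_or]
    cases hb : (scanB l).2 with
    | false => simp [scanB_false_eq l hb]
    | true => simp [scanB_true_ne l hb]

-- generic shape of both ports' accumulating folds
theorem foldl_build {α β : Type} (xs : List α) (f : α → β) (g : α → Bool)
    (acc : List β) (b : Bool) :
    xs.foldl (fun (p : List β × Bool) x => (p.1 ++ [f x], p.2 || g x)) (acc, b)
      = (acc ++ xs.map f, b || xs.any g) := by
  induction xs generalizing acc b with
  | nil => simp
  | cons x xs ih =>
    simp only [List.foldl_cons, List.map_cons, List.any_cons]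
    rw [ih]
    simp [Bool.or_assoc]

-- two lists of equal length differ iff some position differs
theorem ne_iff_exists_getD (l l' : List Char) (h : l.length = l'.length) :
    l ≠ l' ↔ ∃ i < l.length, l.getD i ' ' ≠ l'.getD i ' ' := by
  constructor
  · intro hne
    by_contra hc
    push Not at hc
    exact hne (List.ext_getElem h (fun i h1 h2 => by
      have := hc i h1
      rwa [List.getD_eq_getElem _ ' ' h1, List.getD_eq_getElem _ ' ' h2] at this))
  · rintro ⟨i, hi, hne⟩ rfl
    exact hne rfl

def canonT (rows : List (List Char)) (w : Nat) : List (List Char) :=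
  (List.range w).map (fun i => rows.map (fun r => tCharA (r.getD i ' ')))

theorem foldT (w : Nat) (rows : List (List Char)) (A0 : List (List Char)) (hA : A0.length = w) :
    rows.foldl
      (fun acc line => (List.range w).map (fun i => acc.getD i [] ++ [tCharA (line.getD i ' ')]))
      A0
    = (List.range w).map (fun i => A0.getD i [] ++ rows.map (fun r => tCharA (r.getD i ' '))) := by
  induction rows generalizing A0 with
  | nil =>
    simp only [List.foldl_nil, List.map_nil, List.append_nil]
    symm
    apply List.ext_getElem (by simp [hA])
    intro i h1 h2
    simp only [List.getElem_map, List.getElem_range]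
    rw [List.getD_eq_getElem _ _ (by omega)]
  | cons r rs ih =>
    rw [List.foldl_cons, ih _ (by simp)]
    apply List.map_congr_left
    intro i hi
    simp only [List.mem_range] at hi
    rw [PySem.List.getD_map_range _ w i _ hi]
    simp

theorem transposeA_eq_canon (rows : List (List Char)) :
    transposeA rows = canonT rows (rows.headD []).length := by
  unfold transposeA canonT
  rw [foldT _ _ _ (by simp)]
  apply List.map_congr_left
  intro i hi
  simp only [List.mem_range] at hi
  rw [PySem.List.getD_map_range _ _ i _ hi]
  simp

-- B's inner vertical fold, characterized
theorem inner_fold_eq (g : List (List Char)) (n w : Nat) (r : Nat) (b : Bool) :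
    (List.range w).foldl
      (fun (acc2 : List Char × Bool) (c : Nat) =>
        let up := encB ((g.getD (PySem.Int.mod ((r : Int) - 1) (n : Int)).toNat []).getD c ' ')
        let cur := encB ((g.getD r []).getD c ' ')
        let down := encB ((g.getD (PySem.Int.mod ((r : Int) + 1) (n : Int)).toNat []).getD c ' ')
        let moved := cellB up cur down
        (acc2.1 ++ [encB moved], acc2.2 || decide (moved ≠ cur)))
      ([], b)
    = ((List.range w).map (fun c =>
          encB (cellB (encB ((g.getD (PySem.Int.mod ((r : Int) - 1) (n : Int)).toNat []).getD c ' '))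
                      (encB ((g.getD r []).getD c ' '))
                      (encB ((g.getD (PySem.Int.mod ((r : Int) + 1) (n : Int)).toNat []).getD c ' ')))),
       b || (List.range w).any (fun c =>
          decide (cellB (encB ((g.getD (PySem.Int.mod ((r : Int) - 1) (n : Int)).toNat []).getD c ' '))
                      (encB ((g.getD r []).getD c ' '))
                      (encB ((g.getD (PySem.Int.mod ((r : Int) + 1) (n : Int)).toNat []).getD c ' '))
                  ≠ encB ((g.getD r []).getD c ' ')))) := by
  exact foldl_build (List.range w)
    (fun c =>
      encB (cellB (encB ((g.getD (PySem.Int.mod ((r : Int) - 1) (n : Int)).toNat []).getD c ' '))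
                  (encB ((g.getD r []).getD c ' '))
                  (encB ((g.getD (PySem.Int.mod ((r : Int) + 1) (n : Int)).toNat []).getD c ' '))))
    (fun c =>
      decide (cellB (encB ((g.getD (PySem.Int.mod ((r : Int) - 1) (n : Int)).toNat []).getD c ' '))
                  (encB ((g.getD r []).getD c ' '))
                  (encB ((g.getD (PySem.Int.mod ((r : Int) + 1) (n : Int)).toNat []).getD c ' '))
              ≠ encB ((g.getD r []).getD c ' ')))
    [] b

-- B's outer vertical fold, characterized
theorem outer_fold_eq (g : List (List Char)) (n w : Nat)
    (F : Nat → List Char) (G : Nat → Bool)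
    (hF : ∀ (r : Nat) (b : Bool), (List.range w).foldl
      (fun (acc2 : List Char × Bool) (c : Nat) =>
        let up := encB ((g.getD (PySem.Int.mod ((r : Int) - 1) (n : Int)).toNat []).getD c ' ')
        let cur := encB ((g.getD r []).getD c ' ')
        let down := encB ((g.getD (PySem.Int.mod ((r : Int) + 1) (n : Int)).toNat []).getD c ' ')
        let moved := cellB up cur down
        (acc2.1 ++ [encB moved], acc2.2 || decide (moved ≠ cur)))
      ([], b) = (F r, b || G r)) :
    (List.range n).foldl
      (fun (acc : List (List Char) × Bool) (r : Nat) =>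
        let rr := (List.range w).foldl
          (fun (acc2 : List Char × Bool) (c : Nat) =>
            let up := encB ((g.getD (PySem.Int.mod ((r : Int) - 1) (n : Int)).toNat []).getD c ' ')
            let cur := encB ((g.getD r []).getD c ' ')
            let down := encB ((g.getD (PySem.Int.mod ((r : Int) + 1) (n : Int)).toNat []).getD c ' ')
            let moved := cellB up cur down
            (acc2.1 ++ [encB moved], acc2.2 || decide (moved ≠ cur)))
          ([], acc.2)
        (acc.1 ++ [rr.1], rr.2))
      ([], false)
    = ((List.range n).map F, (List.range n).any G) := by
  suffices h : ∀ (rs : List Nat) (acc : List (List Char)) (b : Bool),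
      rs.foldl
        (fun (acc : List (List Char) × Bool) (r : Nat) =>
          let rr := (List.range w).foldl
            (fun (acc2 : List Char × Bool) (c : Nat) =>
              let up := encB ((g.getD (PySem.Int.mod ((r : Int) - 1) (n : Int)).toNat []).getD c ' ')
              let cur := encB ((g.getD r []).getD c ' ')
              let down := encB ((g.getD (PySem.Int.mod ((r : Int) + 1) (n : Int)).toNat []).getD c ' ')
              let moved := cellB up cur down
              (acc2.1 ++ [encB moved], acc2.2 || decide (moved ≠ cur)))
            ([], acc.2)
          (acc.1 ++ [rr.1], rr.2)) (acc, b)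
      = (acc ++ rs.map F, b || rs.any G) by
    simpa using h (List.range n) [] false
  intro rs
  induction rs with
  | nil => intro acc b; simp
  | cons r rs ih =>
    intro acc b
    simp only [List.foldl_cons, List.map_cons, List.any_cons]
    rw [hF r b, ih]
    simp [Bool.or_assoc]

-- B's _enc is A's transpose character map
theorem encB_eq_tCharA : encB = tCharA := rfl

-- reading one entry of a transposed column
theorem col_getD (g : List (List Char)) (c j : Nat) (hj : j < g.length) :
    (g.map (fun row => tCharA (row.getD c ' '))).getD j ' ' = tCharA ((g.getD j []).getD c ' ') := by
  rw [List.getD_eq_getElem _ _ (by simpa using hj), List.getElem_map,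
      List.getD_eq_getElem _ _ hj]

theorem any_congr_mem {α : Type} (l : List α) (p q : α → Bool)
    (h : ∀ x ∈ l, p x = q x) : l.any p = l.any q := by
  induction l with
  | nil => rfl
  | cons x xs ih =>
    simp only [List.any_cons, h x (by simp)]
    rw [ih (fun y hy => h y (by simp [hy]))]

theorem any_swap (a b : Nat) (p : Nat → Nat → Bool) :
    (List.range a).any (fun x => (List.range b).any (fun y => p x y))
      = (List.range b).any (fun y => (List.range a).any (fun x => p x y)) := by
  rw [Bool.eq_iff_iff]
  simp only [List.any_eq_true, List.mem_range]
  constructor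
  · rintro ⟨x, hx, y, hy, h⟩; exact ⟨y, hy, x, hx, h⟩
  · rintro ⟨y, hy, x, hx, h⟩; exact ⟨x, hx, y, hy, h⟩

-- "the row changed" as a position-wise any
theorem stencil_ne_any (col : List Char) :
    decide (stencilRow col ≠ col)
      = (List.range col.length).any
          (fun r => decide ((stencilRow col).getD r ' ' ≠ col.getD r ' ')) := by
  rw [Bool.eq_iff_iff]
  simp only [decide_eq_true_eq, List.any_eq_true, List.mem_range]
  constructor
  · intro hne
    obtain ⟨i, hi, hd⟩ := (ne_iff_exists_getD _ _ (by rw [stencilRow_length])).mp hne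
    exact ⟨i, by rwa [stencilRow_length] at hi, hd⟩
  · rintro ⟨i, hi, hd⟩
    exact (ne_iff_exists_getD _ _ (by rw [stencilRow_length])).mpr
      ⟨i, by rwa [stencilRow_length], hd⟩

theorem headD_map_range {β : Type} (f : Nat → β) (d : β) (w : Nat) (hw : 0 < w) :
    ((List.range w).map f).headD d = f 0 := by
  obtain ⟨w', rfl⟩ : ∃ w', w = w' + 1 := ⟨w - 1, by omega⟩
  rw [List.range_succ_eq_map]
  simp

-- A's accumulating fold over nonempty rows, in closed form
theorem fold_proc_gen (rows : List (List Char)) (h : ∀ r ∈ rows, r ≠ [])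
    (acc : List (List Char)) (b : Bool) :
    rows.foldl (fun (acc : List (List Char) × Bool) line =>
        (acc.1 ++ [(procA line).1], acc.2 || (procA line).2)) (acc, b)
      = (acc ++ rows.map stencilRow, b || rows.any (fun r => decide (stencilRow r ≠ r))) := by
  induction rows generalizing acc b with
  | nil => simp
  | cons r rs ih =>
    simp only [List.foldl_cons, List.map_cons, List.any_cons]
    rw [show procA r = (stencilRow r, decide (stencilRow r ≠ r)) from
      procA_stencil r (h r (by simp))]
    rw [ih (fun x hx => h x (by simp [hx]))]
    simp [Bool.or_assoc]

theorem fold_proc (rows : List (List Char)) (h : ∀ r ∈ rows, r ≠ []) :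
    rows.foldl (fun (acc : List (List Char) × Bool) line =>
        (acc.1 ++ [(procA line).1], acc.2 || (procA line).2)) ([], false)
      = (rows.map stencilRow, rows.any (fun r => decide (stencilRow r ≠ r))) := by
  simpa using fold_proc_gen rows h [] false

-- ===== VERDICT (by name: the statement is the Claim_ definition above) =====
theorem one_direction_spec : Claim_equal_one_direction := by
  intro strings vertical _ hpre
  unfold Spec_one_direction
  cases vertical with
  | false =>
    simp only [Pre_one_direction, if_neg (by simp : ¬ (false = true))] at hpre
    simp only [one_direction, one_direction_alt, Bool.false_eq_true, if_false]
    have hfold : ∀ (rows : List (List Char)), (∀ r ∈ rows, r ≠ []) →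
        ∀ (acc : List (List Char)) (b : Bool),
        rows.foldl (fun (acc : List (List Char) × Bool) line =>
            let pr := procA line
            (acc.1 ++ [pr.1], acc.2 || pr.2)) (acc, b)
          = rows.foldl (fun (acc : List (List Char) × Bool) row =>
            let nw := stencilRow row
            (acc.1 ++ [nw], acc.2 || decide (nw ≠ row))) (acc, b) := by
      intro rows h
      induction rows with
      | nil => intro acc b; rfl
      | cons r rs ih =>
        intro acc b
        simp only [List.foldl_cons]
        rw [show procA r = (stencilRow r, decide (stencilRow r ≠ r)) from
          procA_stencil r (h r (by simp))]
        exact ih (fun x hx => h x (by simp [hx])) _ _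
    rw [hfold (strings.map String.toList) ?_ [] false]
    intro r hr
    simp only [List.mem_map] at hr
    obtain ⟨str, hs, rfl⟩ := hr
    exact hpre str hs
  | true =>
    simp only [Pre_one_direction] at hpre
    obtain ⟨hne, hw, hall⟩ := hpre
    simp only [one_direction, one_direction_alt, if_true]
    set g := strings.map String.toList with hg
    set n := g.length with hn
    set w := (g.headD []).length with hwdef
    have hne0 : g ≠ [] := by simpa [hg] using hne
    have hnpos : 0 < n := by rw [hn]; exact List.length_pos_iff.mpr hne0
    have hwstr : w = (strings.headD "").toList.length := by
      rcases hs : strings with _ | ⟨s, ss⟩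
      · exact absurd hs hne
      · simp [hwdef, hg, hs]
    have hwpos : 0 < w := by rw [hwstr]; exact hw
    set colF := fun (c : Nat) => g.map (fun row => tCharA (row.getD c ' ')) with hcolF
    have hlencol : ∀ c, (colF c).length = n := by
      intro c
      simp [hcolF, hn]
    have hTA1 : transposeA g = (List.range w).map colF := by
      rw [transposeA_eq_canon, ← hwdef]
      rfl
    have hcols_ne : ∀ t ∈ (List.range w).map colF, t ≠ [] := by
      intro t ht
      simp only [List.mem_map] at ht
      obtain ⟨c, _, rfl⟩ := ht
      intro h0
      have := hlencol c
      rw [h0] at this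
      simp at this
      omega
    have hfoldA := fold_proc ((List.range w).map colF) hcols_ne
    have hX : ((List.range w).map colF).map stencilRow
        = (List.range w).map (fun c => stencilRow (colF c)) := by
      rw [List.map_map]
      rfl
    have hheadX : (((List.range w).map (fun c => stencilRow (colF c))).headD []).length = n := by
      rw [headD_map_range _ _ _ hwpos, stencilRow_length]
      exact hlencol 0
    have hTA2 : transposeA ((List.range w).map (fun c => stencilRow (colF c)))
        = (List.range n).map (fun r =>
            ((List.range w).map (fun c => stencilRow (colF c))).map
              (fun col => tCharA (col.getD r ' '))) := by
      rw [transposeA_eq_canon, hheadX]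
      rfl
    -- one output cell, A-shaped = B-shaped
    have hcell : ∀ (r : Nat), r < n → ∀ (c : Nat), c < w →
        (stencilRow (colF c)).getD r ' '
          = cellB (encB ((g.getD (PySem.Int.mod ((r : Int) - 1) (n : Int)).toNat []).getD c ' '))
                  (encB ((g.getD r []).getD c ' '))
                  (encB ((g.getD (PySem.Int.mod ((r : Int) + 1) (n : Int)).toNat []).getD c ' ')) := by
      intro r hrn c hcw
      rw [stencilRow_getD (colF c) r (by rw [hlencol]; exact hrn), hlencol c]
      have hb1 : (if r = 0 then n - 1 else r - 1) < g.length := by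
        rw [← hn]; split_ifs <;> omega
      have hb2 : r < g.length := by rw [← hn]; exact hrn
      have hb3 : (if r + 1 = n then 0 else r + 1) < g.length := by
        rw [← hn]; split_ifs <;> omega
      rw [hcolF]
      rw [col_getD g c _ hb1, col_getD g c _ hb2, col_getD g c _ hb3]
      rw [← modIdx_pred r n hrn, ← modIdx_succ r n hrn, encB_eq_tCharA]
    set F := fun (r : Nat) => (List.range w).map (fun c =>
          encB (cellB (encB ((g.getD (PySem.Int.mod ((r : Int) - 1) (n : Int)).toNat []).getD c ' '))
                      (encB ((g.getD r []).getD c ' '))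
                      (encB ((g.getD (PySem.Int.mod ((r : Int) + 1) (n : Int)).toNat []).getD c ' ')))) with hFdef
    set G := fun (r : Nat) => (List.range w).any (fun c =>
          decide (cellB (encB ((g.getD (PySem.Int.mod ((r : Int) - 1) (n : Int)).toNat []).getD c ' '))
                      (encB ((g.getD r []).getD c ' '))
                      (encB ((g.getD (PySem.Int.mod ((r : Int) + 1) (n : Int)).toNat []).getD c ' '))
                  ≠ encB ((g.getD r []).getD c ' '))) with hGdef
    have hBfold := outer_fold_eq g n w F G (fun r b => by
      rw [hFdef, hGdef]
      exact inner_fold_eq g n w r b)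
    rw [hTA1, hfoldA, hBfold]
    dsimp only
    rw [hX, hTA2]
    refine Prod.ext ?_ ?_
    · -- the grids agree
      dsimp only
      congr 1
      apply List.map_congr_left
      intro r hr
      rw [List.mem_range] at hr
      rw [List.map_map, hFdef]
      apply List.map_congr_left
      intro c hc
      rw [List.mem_range] at hc
      show tCharA ((stencilRow (colF c)).getD r ' ') = _
      rw [hcell r hr c hc, encB_eq_tCharA]
    · -- the found flags agree
      dsimp only
      rw [List.any_map]
      rw [any_congr_mem (List.range w) _
        (fun c => (List.range n).any (fun r =>
          decide ((stencilRow (colF c)).getD r ' ' ≠ (colF c).getD r ' ')))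
        (by
          intro c hc
          show decide (stencilRow (colF c) ≠ colF c) = _
          rw [stencil_ne_any (colF c), hlencol c])]
      rw [any_swap]
      apply any_congr_mem
      intro r hr
      rw [List.mem_range] at hr
      rw [hGdef]
      apply any_congr_mem
      intro c hc
      rw [List.mem_range] at hc
      rw [hcell r hr c hc]
      have hcur : (colF c).getD r ' ' = encB ((g.getD r []).getD c ' ') := by
        rw [hcolF, encB_eq_tCharA]
        exact col_getD g c r (by rw [← hn]; exact hr)
      rw [hcur]
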